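-- pv_equiv track=rewrite | github.com/narendraanbazhagann/Telegram-AI-Chatbot-CHOLAN-AI- | src/utils/moderation.py | _determine_violation_severity
-- ===== SOURCE A (Python) =====
-- def _determine_violation_severity(violations: list) -> str:
--     """Determine the severity level of violations"""
--
--     severe_words = ['retard', 'bastard']  # More serious violations
--     moderate_words = ['stupid', 'idiot', 'moron', 'dumb', 'asshole']
--
--     if any(word in severe_words for word in violations):
--         return 'severe'
--     elif any(word in moderate_words for word in violations):
--         return 'moderate'
--     else:
--         return 'mild'
-- ===== SOURCE B (Python) =====
-- def _determine_violation_severity(violations: list) -> str: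
--     """Determine the severity level of violations"""
--     severe = {'retard', 'bastard'}
--     moderate = {'stupid', 'idiot', 'moron', 'dumb', 'asshole'}
--     has_severe = False
--     has_moderate = False
--     for word in violations:
--         if word in severe:
--             has_severe = True
--         elif word in moderate:
--             has_moderate = True
--     if has_severe:
--         return 'severe'
--     if has_moderate:
--         return 'moderate'
--     return 'mild'
-- ===== Notes on version B (the rewrite author's own statement) =====
-- stated objective: alternative
-- what changed: Two separate any() scans over the list are replaced by a single pass maintaining has_severe/has_moderate flags with set membership tests, the severity decided after the loop.
import Mathlib
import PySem

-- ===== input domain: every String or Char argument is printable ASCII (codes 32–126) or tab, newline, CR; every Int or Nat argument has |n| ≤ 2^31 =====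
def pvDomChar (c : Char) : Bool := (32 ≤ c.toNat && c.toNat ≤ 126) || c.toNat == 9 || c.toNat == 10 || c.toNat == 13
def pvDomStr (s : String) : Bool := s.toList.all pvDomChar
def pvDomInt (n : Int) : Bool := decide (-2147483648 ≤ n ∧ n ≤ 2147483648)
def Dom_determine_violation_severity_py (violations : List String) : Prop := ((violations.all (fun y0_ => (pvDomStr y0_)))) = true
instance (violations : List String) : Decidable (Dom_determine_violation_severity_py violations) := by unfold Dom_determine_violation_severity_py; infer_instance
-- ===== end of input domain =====

-- B replaces A's two any() scans with a single pass keeping two flags, deciding severity after the loop (alternative decomposition, same cost).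


-- ===== PORT A =====
def determine_violation_severity_py (violations : List String) : String :=
  let severe_words : List String := ["retard", "bastard"]
  let moderate_words : List String := ["stupid", "idiot", "moron", "dumb", "asshole"]
  if violations.any (fun word => severe_words.contains word) then "severe"
  else if violations.any (fun word => moderate_words.contains word) then "moderate"
  else "mild"

-- ===== PORT B =====
def pvStepB (severe moderate : PySem.Set String) (st : Bool × Bool) (word : String) : Bool × Bool :=
  if PySem.Set.contains severe word then (true, st.2)
  else if PySem.Set.contains moderate word then (st.1, true)
  else st

def determine_violation_severity_py_alt (violations : List String) : String :=
  let severe : PySem.Set String := PySem.Set.ofList ["retard", "bastard"]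
  let moderate : PySem.Set String := PySem.Set.ofList ["stupid", "idiot", "moron", "dumb", "asshole"]
  let st := violations.foldl (pvStepB severe moderate) (false, false)
  if st.1 then "severe" else if st.2 then "moderate" else "mild"

-- ===== PRECONDITION & SPEC =====
def Spec_determine_violation_severity_py (violations : List String) (out : String) : Prop := out = determine_violation_severity_py_alt violations
instance (violations : List String) (out : String) : Decidable (Spec_determine_violation_severity_py violations out) := by unfold Spec_determine_violation_severity_py; infer_instance

-- ===== CLAIM (what is proved, stated in full; the proofs are below) =====
def Claim_equal_determine_violation_severity_py : Prop := ∀ (violations : List String), Dom_determine_violation_severity_py violations → Spec_determine_violation_severity_py violations (determine_violation_severity_py violations)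

-- ===== LEMMAS AND PROOFS =====

-- the one-pass fold computes "some severe word seen" and "some non-severe moderate word seen"
theorem pvStepB_fold (sev mod : PySem.Set String) (l : List String) (a b : Bool) :
    l.foldl (pvStepB sev mod) (a, b) =
      (a || l.any (fun w => PySem.Set.contains sev w),
       b || l.any (fun w => !PySem.Set.contains sev w && PySem.Set.contains mod w)) := by
  induction l generalizing a b with
  | nil => simp
  | cons x xs ih =>
    simp only [List.foldl_cons, List.any_cons]
    by_cases hs : x ∈ sev <;> by_cases hm : x ∈ mod <;>
      simp [pvStepB, hs, hm, ih]

theorem determine_violation_severity_py_spec : Claim_equal_determine_violation_severity_py := by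
  intro violations _
  simp only [Spec_determine_violation_severity_py, determine_violation_severity_py,
    determine_violation_severity_py_alt]
  rw [pvStepB_fold]
  simp only [Bool.false_or]
  have hset1 : PySem.Set.ofList ["retard", "bastard"] = (["retard", "bastard"] : List String) := by
    decide
  have hset2 : PySem.Set.ofList ["stupid", "idiot", "moron", "dumb", "asshole"] =
      (["stupid", "idiot", "moron", "dumb", "asshole"] : List String) := by decide
  rw [hset1, hset2]
  show (if violations.any (fun word => (["retard", "bastard"] : List String).contains word) then "severe"
        else if violations.any (fun word =>
            (["stupid", "idiot", "moron", "dumb", "asshole"] : List String).contains word) then "moderate"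
        else "mild") = _
  by_cases hs : violations.any (fun word => (["retard", "bastard"] : List String).contains word)
  · rw [if_pos hs, show (violations.any fun w =>
        PySem.Set.contains (["retard", "bastard"] : List String) w) = true from hs, if_pos rfl]
  · have hfalse := Bool.not_eq_true _ |>.mp hs
    rw [if_neg hs, show (violations.any fun w =>
        PySem.Set.contains (["retard", "bastard"] : List String) w) = false from hfalse]
    have hmod : (violations.any fun w =>
          !PySem.Set.contains (["retard", "bastard"] : List String) w &&
            PySem.Set.contains (["stupid", "idiot", "moron", "dumb", "asshole"] : List String) w) =
        violations.any (fun word =>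
          (["stupid", "idiot", "moron", "dumb", "asshole"] : List String).contains word) := by
      apply PySem.List.any_congr_mem
      intro x hx
      have hxs : (["retard", "bastard"] : List String).contains x = false :=
        Bool.not_eq_true _ |>.mp (List.any_eq_false.mp hfalse x hx)
      show (!(["retard", "bastard"] : List String).contains x && _) = _
      rw [hxs]
      simp
    rw [hmod]
    simp
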